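-- pv_equiv track=rewrite | github.com/makac1896/f1tenth_sim | milestone3/vision_gap_follow.py | _find_widest_gap
-- ===== SOURCE A (Python) =====
-- def _find_widest_gap(valid_cols):
--     best_start, best_end, width_best = 0, 0, 0
--     W = len(valid_cols)
--
--     i = 0
--     # widest gap found from cols
--     while i < W:
--         if valid_cols[i]:
--             j = i
--             while j < W and valid_cols[j]:
--                 j += 1
--             width = j - i
--             if width > width_best:
--                 width_best, best_start, best_end = width, i, j
--             i = j
--         else:
--             i += 1
--
--     return best_start, best_end, width_best
-- ===== SOURCE B (Python) =====
-- def _find_widest_gap(valid_cols):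
--     # DP pass: runs_ending[i] = length of the contiguous truthy run ending at i
--     run = 0
--     runs_ending = []
--     for v in valid_cols:
--         run = run + 1 if v else 0
--         runs_ending.append(run)
--     # argmax pass: first strict maximum of the DP table gives the first widest run
--     width, end = 0, 0
--     for i, r in enumerate(runs_ending):
--         if r > width:
--             width, end = r, i + 1
--     return end - width, end, width
-- ===== Notes on version B (the rewrite author's own statement) =====
-- stated objective: alternative
-- what changed: Replaces the nested scan-then-jump while loops over runs with a dynamic-programming pass that materializes per-index run lengths ending at each column, followed by a separate first-argmax pass over that table; the best run is reconstructed arithmetically from (end, width).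
import Mathlib
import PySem

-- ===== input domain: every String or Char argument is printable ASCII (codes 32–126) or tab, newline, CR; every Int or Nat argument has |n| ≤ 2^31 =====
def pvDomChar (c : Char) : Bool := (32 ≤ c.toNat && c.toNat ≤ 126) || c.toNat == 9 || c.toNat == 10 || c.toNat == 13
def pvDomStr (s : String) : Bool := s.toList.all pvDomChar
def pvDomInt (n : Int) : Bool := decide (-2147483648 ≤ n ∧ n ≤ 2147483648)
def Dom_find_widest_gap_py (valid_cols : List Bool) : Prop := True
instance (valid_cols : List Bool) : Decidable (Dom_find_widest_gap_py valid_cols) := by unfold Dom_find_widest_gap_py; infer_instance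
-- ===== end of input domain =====

-- B replaces the nested scan-then-jump while loops with a DP table of per-index run
-- lengths plus a separate first-argmax pass (alternative algorithm; same O(n); return value only).

-- ===== PORT A =====
-- inner 'while j < W and valid_cols[j]: j += 1' of A
def fwgScan (xs : List Bool) (j : Nat) : Nat :=
  if h : j < xs.length then
    if xs[j] then fwgScan xs (j + 1) else j
  else j
termination_by xs.length - j

theorem fwgScan_ge (xs : List Bool) (j : Nat) : j ≤ fwgScan xs j := by
  unfold fwgScan
  split
  · split
    · have := fwgScan_ge xs (j + 1); omega
    · omega
  · omega
termination_by xs.length - j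

-- outer 'while i < W' of A, carrying (best_start, best_end, width_best)
def fwgLoop (xs : List Bool) (i : Nat) (bs be wb : Int) : Int × Int × Int :=
  if h : i < xs.length then
    if xs[i] then
      let j := fwgScan xs i
      let width : Int := (j : Int) - (i : Int)
      if width > wb then fwgLoop xs j (i : Int) (j : Int) width
      else fwgLoop xs j bs be wb
    else fwgLoop xs (i + 1) bs be wb
  else (bs, be, wb)
termination_by xs.length - i
decreasing_by
  all_goals first
    | omega
    | (have h1 : i + 1 ≤ fwgScan xs (i + 1) := fwgScan_ge xs (i + 1)
       have h2 : fwgScan xs i = fwgScan xs (i + 1) := by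
         conv_lhs => unfold fwgScan
         simp [*]
       omega)

def find_widest_gap_py (valid_cols : List Bool) : Int × Int × Int :=
  fwgLoop valid_cols 0 0 0 0

-- ===== PORT B =====
-- DP pass of B: 'for v in valid_cols: run = run + 1 if v else 0; runs_ending.append(run)'
def pvGl (run : Int) (xs : List Bool) : List Int :=
  match xs with
  | [] => []
  | v :: t => (if v then run + 1 else 0) :: pvGl (if v then run + 1 else 0) t

-- argmax pass of B: 'for i, r in enumerate(runs_ending): if r > width: width, end = r, i + 1'
def pvAg (g : List Int) (i width e : Int) : Int × Int :=
  match g with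
  | [] => (width, e)
  | r :: t => if r > width then pvAg t (i + 1) r (i + 1) else pvAg t (i + 1) width e

def find_widest_gap_py_alt (valid_cols : List Bool) : Int × Int × Int :=
  let p := pvAg (pvGl 0 valid_cols) 0 0 0
  (p.2 - p.1, p.2, p.1)

-- ===== PRECONDITION & SPEC =====
def Spec_find_widest_gap_py (valid_cols : List Bool) (out : Int × Int × Int) : Prop := out = find_widest_gap_py_alt valid_cols
instance (valid_cols : List Bool) (out : Int × Int × Int) : Decidable (Spec_find_widest_gap_py valid_cols out) := by unfold Spec_find_widest_gap_py; infer_instance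

-- ===== CLAIM (what is proved, stated in full; the proofs are below) =====
def Claim_equal_find_widest_gap_py : Prop := ∀ (valid_cols : List Bool), Dom_find_widest_gap_py valid_cols → Spec_find_widest_gap_py valid_cols (find_widest_gap_py valid_cols)

-- ===== LEMMAS AND PROOFS =====

-- proof-side view of A: the maximal runs of equal elements, as (value, length) pairs
def fwgRuns (xs : List Bool) : List (Bool × Nat) :=
  match xs with
  | [] => []
  | x :: t =>
      (x, 1 + (t.takeWhile (· == x)).length) :: fwgRuns (t.dropWhile (· == x))
termination_by xs.length
decreasing_by simp; have := t.length_dropWhile_le (· == x); omega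

-- proof-side view of A's outer loop acting run by run
def fwgFold (runs : List (Bool × Nat)) (idx : Int) (bs be wb : Int) : Int × Int × Int :=
  match runs with
  | [] => (bs, be, wb)
  | (key, n) :: rest =>
      if key ∧ (n : Int) > wb then fwgFold rest (idx + n) idx (idx + n) (n : Int)
      else fwgFold rest (idx + n) bs be wb

theorem fwgScan_char (xs : List Bool) (i : Nat) :
    fwgScan xs i = i + ((xs.drop i).takeWhile (· == true)).length := by
  unfold fwgScan
  split
  · rename_i h
    rw [List.drop_eq_getElem_cons h]
    split
    · rename_i hx
      rw [fwgScan_char xs (i + 1)]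
      simp [hx, List.takeWhile]
      omega
    · rename_i hx
      simp at hx
      simp [hx, List.takeWhile]
  · rename_i h
    rw [List.drop_eq_nil_of_le (by omega)]
    simp
termination_by xs.length - i

-- drop past the takeWhile prefix = dropWhile
theorem fwg_drop_len_takeWhile (t : List Bool) (p : Bool → Bool) :
    t.drop ((t.takeWhile p).length) = t.dropWhile p := by
  have h : t.drop ((t.takeWhile p).length)
      = (t.takeWhile p ++ t.dropWhile p).drop ((t.takeWhile p).length) := by
    rw [List.takeWhile_append_dropWhile]
  rw [h, List.drop_left]

theorem fwgScan_drop (xs : List Bool) (i : Nat) (h : i < xs.length) (hx : xs[i] = true) :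
    xs.drop (fwgScan xs i) = (xs.drop (i + 1)).dropWhile (· == true) := by
  have hc := fwgScan_char xs i
  rw [List.drop_eq_getElem_cons h, hx, List.takeWhile_cons] at hc
  simp only [BEq.rfl, if_true, List.length_cons] at hc
  rw [hc, show i + ((List.takeWhile (· == true) (xs.drop (i + 1))).length + 1)
      = (i + 1) + (List.takeWhile (· == true) (xs.drop (i + 1))).length from by omega,
    ← List.drop_drop, fwg_drop_len_takeWhile]

-- skipping one false cell in A equals absorbing it into its run in the run view
theorem fwgFold_false_cons (t : List Bool) (idx bs be wb : Int) :
    fwgFold (fwgRuns (false :: t)) idx bs be wb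
      = fwgFold (fwgRuns t) (idx + 1) bs be wb := by
  match t with
  | [] => simp [fwgRuns, fwgFold]
  | true :: t' =>
      simp [fwgRuns, fwgFold, List.takeWhile, List.dropWhile]
  | false :: t' =>
      simp only [fwgRuns, List.takeWhile_cons, List.dropWhile_cons]
      simp only [fwgFold]
      norm_num
      have e : ∀ L : Nat, idx + (1 + ((L : Int) + 1)) = idx + 1 + (1 + L) := by
        intro L; ring
      rw [e]

theorem fwgLoop_eq_fold (xs : List Bool) (i : Nat) (bs be wb : Int) :
    fwgLoop xs i bs be wb = fwgFold (fwgRuns (xs.drop i)) (i : Int) bs be wb := by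
  unfold fwgLoop
  split
  · rename_i h
    split
    · rename_i hx
      have hdrop : xs.drop i = true :: xs.drop (i + 1) := by
        rw [List.drop_eq_getElem_cons h, hx]
      have hscan := fwgScan_char xs i
      have hscan_drop := fwgScan_drop xs i h hx
      set j := fwgScan xs i with hj
      set n : Nat := ((xs.drop (i + 1)).takeWhile (· == true)).length with hn
      have hjlen : j = i + 1 + n := by
        rw [hscan, hdrop, List.takeWhile_cons]
        simp only [BEq.rfl, if_true, List.length_cons]
        omega
      have hruns : fwgRuns (xs.drop i)
          = (true, 1 + n) :: fwgRuns (xs.drop j) := by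
        rw [hdrop]
        simp only [fwgRuns]
        rw [hscan_drop]
      rw [hruns]
      simp only [fwgFold, true_and]
      have hw : ((1 + n : Nat) : Int) = (j : Int) - (i : Int) := by omega
      have hidx : (i : Int) + ((1 + n : Nat) : Int) = (j : Int) := by omega
      by_cases hc : ((j : Int) - (i : Int)) > wb
      · rw [if_pos hc, if_pos (by omega), fwgLoop_eq_fold xs j, hidx]
        congr 1
        omega
      · rw [if_neg hc, if_neg (by omega), fwgLoop_eq_fold xs j, hidx]
    · rename_i hx
      simp only [Bool.not_eq_true] at hx
      have hdrop : xs.drop i = false :: xs.drop (i + 1) := by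
        rw [List.drop_eq_getElem_cons h, hx]
      rw [hdrop, fwgFold_false_cons, fwgLoop_eq_fold xs (i + 1)]
      norm_num
  · rename_i h
    rw [List.drop_eq_nil_of_le (by omega)]
    simp [fwgRuns, fwgFold]
termination_by xs.length - i
decreasing_by
  all_goals omega

-- B's argmax pass over one truthy run with entry values r+1, r+2, …:
-- it updates to (final value, final position) iff the final value beats width
theorem pvAg_run (t : List Bool) (r idx w e : Int) (hw : 0 ≤ w) (hr : 0 ≤ r) :
    pvAg (pvGl r (true :: t)) idx w e
      = pvAg (pvGl 0 (t.dropWhile (· == true)))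
          (idx + 1 + ((t.takeWhile (· == true)).length : Int))
          (if r + 1 + ((t.takeWhile (· == true)).length : Int) > w
             then r + 1 + ((t.takeWhile (· == true)).length : Int) else w)
          (if r + 1 + ((t.takeWhile (· == true)).length : Int) > w
             then idx + 1 + ((t.takeWhile (· == true)).length : Int) else e) := by
  match t with
  | [] =>
      simp only [pvGl, List.takeWhile_nil, List.dropWhile_nil, List.length_nil,
        Nat.cast_zero, add_zero, if_true, pvAg]
      split <;> simp
  | false :: t' =>
      have h1 : pvGl r (true :: false :: t') = (r + 1) :: 0 :: pvGl 0 t' := by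
        simp [pvGl]
      have h2 : (false :: t').takeWhile (· == true) = ([] : List Bool) := by
        simp [List.takeWhile]
      have h3 : (false :: t').dropWhile (· == true) = false :: t' := by
        simp [List.dropWhile]
      have h4 : pvGl 0 (false :: t') = 0 :: pvGl 0 t' := by simp [pvGl]
      rw [h1, h2, h3, h4]
      simp only [List.length_nil, Nat.cast_zero, add_zero, pvAg]
      by_cases hc : r + 1 > w
      · rw [if_pos hc, if_pos hc, if_pos hc, if_neg (by omega)]
      · rw [if_neg hc, if_neg hc, if_neg hc, if_neg (by omega)]
  | true :: t' =>
      have h1 : pvGl r (true :: true :: t') = (r + 1) :: pvGl (r + 1) (true :: t') := by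
        simp [pvGl]
      have h2 : (true :: t').takeWhile (· == true) = true :: t'.takeWhile (· == true) :=
        List.takeWhile_cons_of_pos (by decide)
      have h3 : (true :: t').dropWhile (· == true) = t'.dropWhile (· == true) :=
        List.dropWhile_cons_of_pos (by decide)
      rw [h1, h2, h3]
      simp only [pvAg, List.length_cons]
      set L : Int := ((t'.takeWhile (· == true)).length : Int) with hL
      have hLnn : 0 ≤ L := by positivity
      have hcast : (((t'.takeWhile (· == true)).length + 1 : Nat) : Int) = L + 1 := by
        push_cast [hL]; ring
      rw [hcast]
      by_cases hc : r + 1 > w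
      · rw [if_pos hc]
        rw [pvAg_run t' (r + 1) (idx + 1) (r + 1) (idx + 1) (by omega) (by omega)]
        rw [if_pos (by omega), if_pos (by omega), if_pos (by omega), if_pos (by omega)]
        simp only [hL]; ring_nf
      · rw [if_neg hc]
        rw [pvAg_run t' (r + 1) (idx + 1) w e hw (by omega)]
        by_cases hk : r + 1 + 1 + L > w
        · rw [if_pos (by omega), if_pos (by omega), if_pos (by omega), if_pos (by omega)]
          simp only [hL]; ring_nf
        · rw [if_neg (by omega), if_neg (by omega), if_neg (by omega), if_neg (by omega)]
          simp only [hL]; ring_nf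

-- the run view of A equals B's DP-table + argmax computation
theorem fwgFold_eq_ag (xs : List Bool) (idx w e : Int) (hw : 0 ≤ w) :
    fwgFold (fwgRuns xs) idx (e - w) e w
      = (let p := pvAg (pvGl 0 xs) idx w e; (p.2 - p.1, p.2, p.1)) := by
  match xs with
  | [] => simp [fwgRuns, fwgFold, pvGl, pvAg]
  | false :: t =>
      rw [fwgFold_false_cons]
      have h4 : pvGl 0 (false :: t) = 0 :: pvGl 0 t := by simp [pvGl]
      rw [h4]
      simp only [pvAg]
      rw [if_neg (by omega)]
      exact fwgFold_eq_ag t (idx + 1) w e hw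
  | true :: t =>
      have hruns : fwgRuns (true :: t)
          = (true, 1 + (t.takeWhile (· == true)).length) :: fwgRuns (t.dropWhile (· == true)) := by
        simp [fwgRuns]
      rw [hruns]
      simp only [fwgFold, true_and]
      rw [pvAg_run t 0 idx w e hw (by omega)]
      set L : Int := ((t.takeWhile (· == true)).length : Int) with hL
      have hLnn : 0 ≤ L := by positivity
      have hcast : ((1 + (t.takeWhile (· == true)).length : Nat) : Int) = 1 + L := by
        push_cast [hL]; ring
      have e1 : idx + ((1 + (t.takeWhile (· == true)).length : Nat) : Int) = idx + 1 + L := by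
        rw [hcast]; ring
      have e2 : (0 : Int) + 1 + L = 1 + L := by ring
      rw [e1, hcast, e2]
      by_cases hc : 1 + L > w
      · rw [if_pos hc, if_pos hc, if_pos hc]
        have ih := fwgFold_eq_ag (t.dropWhile (· == true)) (idx + 1 + L) (1 + L) (idx + 1 + L)
          (by omega)
        have hbs : idx + 1 + L - (1 + L) = idx := by ring
        rw [hbs] at ih
        exact ih
      · rw [if_neg hc, if_neg hc, if_neg hc]
        exact fwgFold_eq_ag (t.dropWhile (· == true)) (idx + 1 + L) w e hw
termination_by xs.length
decreasing_by
  all_goals simp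
  all_goals have _h1 := t.length_dropWhile_le (· == true)
  all_goals have _h2 := t.length_dropWhile_le (fun x => x)
  all_goals omega

-- ===== VERDICT (by name: the statement is the Claim_ definition above) =====
theorem find_widest_gap_py_spec : Claim_equal_find_widest_gap_py := by
  intro xs _
  unfold Spec_find_widest_gap_py find_widest_gap_py find_widest_gap_py_alt
  have h0 := fwgLoop_eq_fold xs 0 0 0 0
  simp only [List.drop_zero] at h0
  rw [h0]
  have := fwgFold_eq_ag xs 0 0 0 (by omega)
  simpa using this
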